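-- pv_equiv track=rewrite | github.com/Aasthaengg/IBMdataset | Python_codes/p03329/s163209586.py | rec
-- ===== SOURCE A (Python) =====
-- INF = 10**8
--
-- def rec(x, memo):
--     if x == 0: return 0
--     if memo[x] != -1:
--         return memo[x]
--
--     res = INF
--     pow6 = 1
--     while x - pow6 >= 0:
--         res = min(res, rec(x-pow6, memo)+1)
--         pow6*=6
--
--     pow9 = 1
--     while x - pow9 >= 0:
--         res = min(res, rec(x-pow9, memo)+1)
--         pow9*=9
--
--     memo[x] = res
--     return res
-- ===== SOURCE B (Python) =====
-- INF = 10**8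
--
-- def _relax(i, dp, base):
--     # best over powers of `base` not exceeding i
--     best = INF
--     p = 1
--     while p <= i:
--         best = min(best, dp[i - p] + 1)
--         p *= base
--     return best
--
-- def rec(x, memo):
--     # Bottom-up iterative DP (return value only; unlike A, does not write into memo).
--     if x == 0:
--         return 0
--     if memo[x] != -1:
--         return memo[x]
--     dp = [0]
--     for i in range(1, x + 1):
--         if memo[i] != -1:
--             dp.append(memo[i])
--         else:
--             dp.append(min(_relax(i, dp, 6), _relax(i, dp, 9)))
--     return dp[x]
-- ===== Notes on version B (the rewrite author's own statement) =====
-- stated objective: alternative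
-- what changed: Top-down memoized recursion replaced by a bottom-up iterative DP that fills a fresh dp table from 1 to x (reusing pre-filled memo slots, not mutating memo); return value only — A mutates memo in place, B does not.
-- outside the precondition, e.g. on rec(-1, [5, -1]): A returns 100000000, B returns 0; on rec(-2, [-1, 0]): A returns 100000000, B raises IndexError
import Mathlib
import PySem

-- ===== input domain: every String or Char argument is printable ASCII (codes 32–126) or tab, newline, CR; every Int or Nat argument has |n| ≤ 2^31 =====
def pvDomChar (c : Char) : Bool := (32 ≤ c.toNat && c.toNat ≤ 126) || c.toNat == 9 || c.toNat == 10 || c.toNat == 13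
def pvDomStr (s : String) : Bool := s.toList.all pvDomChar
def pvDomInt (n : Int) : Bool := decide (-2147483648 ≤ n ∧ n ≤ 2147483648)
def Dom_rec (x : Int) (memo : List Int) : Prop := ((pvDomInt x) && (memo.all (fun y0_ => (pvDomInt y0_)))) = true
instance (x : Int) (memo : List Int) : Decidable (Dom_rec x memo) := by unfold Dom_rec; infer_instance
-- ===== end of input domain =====

-- B replaces A's top-down memoized recursion by a bottom-up iterative DP over a fresh table
-- (objective: alternative). Return-value equivalence only: A writes into `memo` in place, B does not.

-- ===== PORT A =====
def pvINF : Int := 100000000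

-- termination facts for the ports (cited by name from decreasing_by)
theorem pvdecC (x : Int) : x.toNat + (x + 1 - 1).toNat < 2 * x.toNat + 1 := by omega
theorem pvdecA (x p : Int) (_h1 : 1 ≤ p) (hc : 0 ≤ x - p) :
    2 * (x - p).toNat + 1 < x.toNat + (x + 1 - p).toNat := by omega
theorem pvdecB (x p q : Int) (_h1 : 1 ≤ p) (h2 : p < q) (hc : 0 ≤ x - p) :
    x.toNat + (x + 1 - q).toNat < x.toNat + (x + 1 - p).toNat := by omega
theorem pvdecR (i p q : Int) (_h1 : 1 ≤ p) (h2 : p < q) (hc : p ≤ i) :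
    (i + 1 - q).toNat < (i + 1 - p).toNat := by omega
theorem pvpow_one_le (b : Int) (k : Nat) (hb : 1 ≤ b) : 1 ≤ b ^ k := one_le_pow₀ hb
theorem pvpow_lt_succ (b : Int) (k : Nat) (hb : 1 < b) : b ^ k < b ^ (k + 1) :=
  pow_lt_pow_right₀ hb (Nat.lt_succ_self k)

-- A's recursion mutates `memo`; the port threads the list as explicit state (result, memo).
-- The while-loop variables pow6/pow9 are tracked as the exponent k (pow = 6^k / 9^k), the same values.
mutual
def recA (x : Int) (memo : List Int) : Int × List Int :=
  if x = 0 then (0, memo)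
  else
    match PySem.List.pyGet? memo x with
    | none => (0, memo)  -- IndexError in Python; excluded by Pre_rec
    | some v =>
      if v ≠ -1 then (v, memo)
      else
        let r6 := loop6 x memo 0 pvINF
        let r9 := loop9 x r6.2 0 r6.1
        (r9.1, PySem.List.pySetD r9.2 x r9.1)   -- memo[x] = res
  termination_by 2 * x.toNat + 1
  decreasing_by
    · simp only [pow_zero]; exact pvdecC x
    · simp only [pow_zero]; exact pvdecC x

def loop6 (x : Int) (memo : List Int) (k : Nat) (res : Int) : Int × List Int :=
  if 0 ≤ x - 6 ^ k then
    let r := recA (x - 6 ^ k) memo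
    loop6 x r.2 (k + 1) (min res (r.1 + 1))
  else (res, memo)
  termination_by x.toNat + (x + 1 - 6 ^ k).toNat
  decreasing_by
    · exact pvdecA x (6 ^ k) (pvpow_one_le 6 k (by norm_num)) (by assumption)
    · exact pvdecB x (6 ^ k) (6 ^ (k + 1)) (pvpow_one_le 6 k (by norm_num))
        (pvpow_lt_succ 6 k (by norm_num)) (by assumption)

def loop9 (x : Int) (memo : List Int) (k : Nat) (res : Int) : Int × List Int :=
  if 0 ≤ x - 9 ^ k then
    let r := recA (x - 9 ^ k) memo
    loop9 x r.2 (k + 1) (min res (r.1 + 1))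
  else (res, memo)
  termination_by x.toNat + (x + 1 - 9 ^ k).toNat
  decreasing_by
    · exact pvdecA x (9 ^ k) (pvpow_one_le 9 k (by norm_num)) (by assumption)
    · exact pvdecB x (9 ^ k) (9 ^ (k + 1)) (pvpow_one_le 9 k (by norm_num))
        (pvpow_lt_succ 9 k (by norm_num)) (by assumption)
end

def rec (x : Int) (memo : List Int) : Int := (recA x memo).1

-- ===== PORT B =====
-- port of Source B's _relax specialized to base 6 / base 9; the loop variable p is tracked as the
-- exponent k (p = base^k), the same values.
def relax6 (i : Int) (dp : List Int) (k : Nat) (best : Int) : Int :=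
  if 6 ^ k ≤ i then
    relax6 i dp (k + 1) (min best (PySem.List.pyGetD dp (i - 6 ^ k) 0 + 1))
  else best
  termination_by (i + 1 - 6 ^ k).toNat
  decreasing_by
    exact pvdecR i (6 ^ k) (6 ^ (k + 1)) (pvpow_one_le 6 k (by norm_num))
      (pvpow_lt_succ 6 k (by norm_num)) (by assumption)

def relax9 (i : Int) (dp : List Int) (k : Nat) (best : Int) : Int :=
  if 9 ^ k ≤ i then
    relax9 i dp (k + 1) (min best (PySem.List.pyGetD dp (i - 9 ^ k) 0 + 1))
  else best
  termination_by (i + 1 - 9 ^ k).toNat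
  decreasing_by
    exact pvdecR i (9 ^ k) (9 ^ (k + 1)) (pvpow_one_le 9 k (by norm_num))
      (pvpow_lt_succ 9 k (by norm_num)) (by assumption)

-- the value appended for index i in the bottom-up loop
def stepVal (memo dp : List Int) (i : Int) : Int :=
  match PySem.List.pyGet? memo i with
  | none => 0  -- IndexError in Python; excluded by Pre_rec
  | some v => if v ≠ -1 then v else min (relax6 i dp 0 pvINF) (relax9 i dp 0 pvINF)

def stepB (memo dp : List Int) (i : Int) : List Int := dp ++ [stepVal memo dp i]

def rec_alt (x : Int) (memo : List Int) : Int :=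
  if x = 0 then 0
  else
    match PySem.List.pyGet? memo x with
    | none => 0  -- IndexError in Python; excluded by Pre_rec
    | some v =>
      if v ≠ -1 then v
      else
        let dp := (PySem.List.pyRange 1 (x + 1) 1).foldl (stepB memo) [0]
        PySem.List.pyGetD dp x 0

-- ===== PRECONDITION & SPEC =====
-- Pre_ excludes (a) out-of-range x, where A raises IndexError, and (b) negative x whose wrapped
-- memo slot is -1, where A's returned INF is an accident of negative-index wraparound and B's
-- natural bottom-up table raises or reads its one-element table instead.
def Pre_rec (x : Int) (memo : List Int) : Prop :=
  x = 0 ∨ (0 < x ∧ x < (memo.length : Int)) ∨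
    (x < 0 ∧ -(memo.length : Int) ≤ x ∧ PySem.List.pyGet? memo x ≠ some (-1))
instance (x : Int) (memo : List Int) : Decidable (Pre_rec x memo) := by unfold Pre_rec; infer_instance

def pvWitness_rec : Int × List Int := (3, [-1, -1, -1, -1])

def Spec_rec (x : Int) (memo : List Int) (out : Int) : Prop := out = rec_alt x memo
instance (x : Int) (memo : List Int) (out : Int) : Decidable (Spec_rec x memo out) := by unfold Spec_rec; infer_instance

-- ===== CLAIM (what is proved, stated in full; the proofs are below) =====
def Claim_equal_rec : Prop := ∀ (x : Int) (memo : List Int), Dom_rec x memo → Pre_rec x memo → Spec_rec x memo (rec x memo)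

-- ===== LEMMAS AND PROOFS =====

-- the bottom-up table after processing indices 1..n
def dpN (memo : List Int) : Nat → List Int
  | 0 => [0]
  | n + 1 => stepB memo (dpN memo n) (↑n + 1)

-- the canonical value of state n
def Dv (memo : List Int) : Nat → Int
  | 0 => 0
  | n + 1 => stepVal memo (dpN memo n) (↑n + 1)

lemma length_dpN (memo : List Int) (n : Nat) : (dpN memo n).length = n + 1 := by
  induction n with
  | zero => rfl
  | succ n ih => simp [dpN, stepB, ih]

lemma dpN_get (memo : List Int) (n j : Nat) (hj : j ≤ n) :
    (dpN memo n)[j]? = some (Dv memo j) := by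
  induction n with
  | zero =>
    interval_cases j
    rfl
  | succ n ih =>
    rcases Nat.lt_or_ge j (n + 1) with h | h
    · rw [dpN, stepB, List.getElem?_append_left (by rw [length_dpN]; omega)]
      exact ih (by omega)
    · have hj' : j = n + 1 := by omega
      subst hj'
      rw [dpN, stepB]
      rw [show n + 1 = (dpN memo n).length from (length_dpN memo n).symm]
      simp [Dv, length_dpN]

lemma relax6_le (i : Int) (dp : List Int) (μ : Nat) :
    ∀ k best, (i + 1 - 6 ^ k).toNat ≤ μ → relax6 i dp k best ≤ best := by
  induction μ with
  | zero =>
    intro k best h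
    have h1 : (1:Int) ≤ 6 ^ k := one_le_pow₀ (by norm_num)
    have hc : ¬ (6 ^ k ≤ i) := by omega
    rw [relax6, if_neg hc]
  | succ μ ih =>
    intro k best h
    by_cases hc : 6 ^ k ≤ i
    · have h1 : (1:Int) ≤ 6 ^ k := one_le_pow₀ (by norm_num)
      have h2 : (6:Int) ^ (k + 1) = 6 * 6 ^ k := by ring
      rw [relax6, if_pos hc]
      exact le_trans (ih (k + 1) _ (by omega)) (min_le_left _ _)
    · rw [relax6, if_neg hc]

lemma relax9_min (i : Int) (dp : List Int) (μ : Nat) :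
    ∀ k a b, (i + 1 - 9 ^ k).toNat ≤ μ → relax9 i dp k (min a b) = min a (relax9 i dp k b) := by
  induction μ with
  | zero =>
    intro k a b h
    have h1 : (1:Int) ≤ 9 ^ k := one_le_pow₀ (by norm_num)
    have hc : ¬ (9 ^ k ≤ i) := by omega
    have e : ∀ best, relax9 i dp k best = best := fun best => by rw [relax9, if_neg hc]
    rw [e, e]
  | succ μ ih =>
    intro k a b h
    by_cases hc : 9 ^ k ≤ i
    · have h1 : (1:Int) ≤ 9 ^ k := one_le_pow₀ (by norm_num)
      have h2 : (9:Int) ^ (k + 1) = 9 * 9 ^ k := by ring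
      have e : ∀ best, relax9 i dp k best =
          relax9 i dp (k + 1) (min best (PySem.List.pyGetD dp (i - 9 ^ k) 0 + 1)) :=
        fun best => by rw [relax9, if_pos hc]
      rw [e, e, min_assoc, ih (k + 1) _ _ (by omega)]
    · have e : ∀ best, relax9 i dp k best = best := fun best => by rw [relax9, if_neg hc]
      rw [e, e]

-- the A-side memo state invariant: agrees with memo0 except that -1 slots may hold their canonical value
def GoodM (memo0 m : List Int) : Prop :=
  m.length = memo0.length ∧
    ∀ j : Nat, j < memo0.length →
      (m[j]? = memo0[j]? ∨ (memo0[j]? = some (-1) ∧ 1 ≤ j ∧ m[j]? = some (Dv memo0 j)))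

lemma goodM_refl (memo0 : List Int) : GoodM memo0 memo0 :=
  ⟨rfl, fun _ _ => Or.inl rfl⟩

lemma pyGetD_dpN (memo0 : List Int) (n j : Nat) (hj : j ≤ n) :
    PySem.List.pyGetD (dpN memo0 n) (↑j) 0 = Dv memo0 j := by
  rw [PySem.List.pyGetD_natCast, List.getD_eq_getElem?_getD, dpN_get memo0 n j hj]
  rfl

lemma loop6_main (memo0 : List Int) (n : Nat) (_hn : n < memo0.length) (_hn1 : 1 ≤ n)
    (IH : ∀ j, j < n → ∀ m, GoodM memo0 m →
      (recA (↑j) m).1 = Dv memo0 j ∧ GoodM memo0 (recA (↑j) m).2)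
    (μ : Nat) :
    ∀ k res m, ((↑n : Int) + 1 - 6 ^ k).toNat ≤ μ → GoodM memo0 m →
      (loop6 (↑n) m k res).1 = relax6 (↑n) (dpN memo0 (n - 1)) k res ∧
        GoodM memo0 (loop6 (↑n) m k res).2 := by
  induction μ with
  | zero =>
    intro k res m h hm
    have h1 : (1:Int) ≤ 6 ^ k := one_le_pow₀ (by norm_num)
    have hc : ¬ (0 ≤ (↑n : Int) - 6 ^ k) := by omega
    rw [loop6, if_neg hc, relax6, if_neg (by omega)]
    exact ⟨rfl, hm⟩
  | succ μ ih =>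
    intro k res m h hm
    have h1 : (1:Int) ≤ 6 ^ k := one_le_pow₀ (by norm_num)
    by_cases hc : 0 ≤ (↑n : Int) - 6 ^ k
    · set j : Nat := ((↑n : Int) - 6 ^ k).toNat with hjdef
      have hj : ((↑n : Int) - 6 ^ k) = ↑j := (Int.toNat_of_nonneg hc).symm
      have hjn : j < n := by omega
      have h2 : (6:Int) ^ (k + 1) = 6 * 6 ^ k := by ring
      have hr := IH j hjn m hm
      rw [loop6, if_pos hc, relax6, if_pos (by omega)]
      simp only [hj] at hr ⊢
      rw [pyGetD_dpN memo0 (n - 1) j (by omega), ← hr.1]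
      exact ih (k + 1) _ _ (by omega) hr.2
    · rw [loop6, if_neg hc, relax6, if_neg (by omega)]
      exact ⟨rfl, hm⟩

lemma loop9_main (memo0 : List Int) (n : Nat) (_hn : n < memo0.length) (_hn1 : 1 ≤ n)
    (IH : ∀ j, j < n → ∀ m, GoodM memo0 m →
      (recA (↑j) m).1 = Dv memo0 j ∧ GoodM memo0 (recA (↑j) m).2)
    (μ : Nat) :
    ∀ k res m, ((↑n : Int) + 1 - 9 ^ k).toNat ≤ μ → GoodM memo0 m →
      (loop9 (↑n) m k res).1 = relax9 (↑n) (dpN memo0 (n - 1)) k res ∧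
        GoodM memo0 (loop9 (↑n) m k res).2 := by
  induction μ with
  | zero =>
    intro k res m h hm
    have h1 : (1:Int) ≤ 9 ^ k := one_le_pow₀ (by norm_num)
    have hc : ¬ (0 ≤ (↑n : Int) - 9 ^ k) := by omega
    rw [loop9, if_neg hc, relax9, if_neg (by omega)]
    exact ⟨rfl, hm⟩
  | succ μ ih =>
    intro k res m h hm
    have h1 : (1:Int) ≤ 9 ^ k := one_le_pow₀ (by norm_num)
    by_cases hc : 0 ≤ (↑n : Int) - 9 ^ k
    · set j : Nat := ((↑n : Int) - 9 ^ k).toNat with hjdef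
      have hj : ((↑n : Int) - 9 ^ k) = ↑j := (Int.toNat_of_nonneg hc).symm
      have hjn : j < n := by omega
      have h2 : (9:Int) ^ (k + 1) = 9 * 9 ^ k := by ring
      have hr := IH j hjn m hm
      rw [loop9, if_pos hc, relax9, if_pos (by omega)]
      simp only [hj] at hr ⊢
      rw [pyGetD_dpN memo0 (n - 1) j (by omega), ← hr.1]
      exact ih (k + 1) _ _ (by omega) hr.2
    · rw [loop9, if_neg hc, relax9, if_neg (by omega)]
      exact ⟨rfl, hm⟩

-- the canonical value of a positive state n: what stepVal computes from the table below it
lemma Dv_succ (memo0 : List Int) (j : Nat) :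
    Dv memo0 (j + 1) = stepVal memo0 (dpN memo0 j) (↑j + 1) := rfl

lemma recA_main (memo0 : List Int) (n : Nat) (hn : n < memo0.length) :
    ∀ m, GoodM memo0 m →
      (recA (↑n) m).1 = Dv memo0 n ∧ GoodM memo0 (recA (↑n) m).2 := by
  induction n using Nat.strong_induction_on with
  | _ n IH =>
  intro m hm
  match n with
  | 0 => rw [recA]; simp [Dv, hm]
  | j + 1 =>
    have hn1 : 1 ≤ j + 1 := by omega
    set n := j + 1 with hndef
    -- the memo slot really read
    have hms : ∃ v, m[n]? = some v := by
      refine ⟨m[n]'(by rw [hm.1]; exact hn), List.getElem?_eq_getElem _⟩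
    obtain ⟨v, hv⟩ := hms
    have hread : PySem.List.pyGet? m (↑n) = some v := by
      rw [PySem.List.pyGet?_natCast, hv]
    have hmemo0 : memo0[n]? = some (memo0[n]'hn) := List.getElem?_eq_getElem _
    have hread0 : PySem.List.pyGet? memo0 (↑n) = memo0[n]? := PySem.List.pyGet?_natCast ..
    have hcase := hm.2 n hn
    rw [recA, if_neg (by omega : ¬ ((↑n : Int) = 0)), hread]
    show (if v ≠ -1 then (v, m)
        else ((loop9 (↑n) (loop6 (↑n) m 0 pvINF).2 0 (loop6 (↑n) m 0 pvINF).1).1,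
          PySem.List.pySetD (loop9 (↑n) (loop6 (↑n) m 0 pvINF).2 0 (loop6 (↑n) m 0 pvINF).1).2
            (↑n) (loop9 (↑n) (loop6 (↑n) m 0 pvINF).2 0 (loop6 (↑n) m 0 pvINF).1).1)).1
        = Dv memo0 n ∧
      GoodM memo0 (if v ≠ -1 then (v, m)
        else ((loop9 (↑n) (loop6 (↑n) m 0 pvINF).2 0 (loop6 (↑n) m 0 pvINF).1).1,
          PySem.List.pySetD (loop9 (↑n) (loop6 (↑n) m 0 pvINF).2 0 (loop6 (↑n) m 0 pvINF).1).2
            (↑n) (loop9 (↑n) (loop6 (↑n) m 0 pvINF).2 0 (loop6 (↑n) m 0 pvINF).1).1)).2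
    by_cases hv1 : v = -1
    · -- the slot reads -1, so memo0[n] = -1 and the loops run
      subst hv1
      have hm0 : memo0[n]? = some (-1) := by
        rcases hcase with hsame | ⟨h0, _, hval⟩
        · rw [← hsame, hv]
        · exact h0
      have hDv : Dv memo0 n = min (relax6 (↑n) (dpN memo0 j) 0 pvINF)
          (relax9 (↑n) (dpN memo0 j) 0 pvINF) := by
        rw [Dv_succ, stepVal]
        have : PySem.List.pyGet? memo0 ((↑j : Int) + 1) = some (-1) := by
          rw [show ((↑j : Int) + 1) = ((↑n : Nat) : Int) by push_cast [hndef]; ring,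
            hread0, hm0]
        rw [this]
        simp only [ne_eq, not_true_eq_false, reduceIte]
        rw [show ((↑n : Nat) : Int) = (↑j : Int) + 1 from by push_cast [hndef]; ring]
      rw [if_neg (fun hh => hh rfl)]
      have hIH : ∀ i, i < n → ∀ m', GoodM memo0 m' →
          (recA (↑i) m').1 = Dv memo0 i ∧ GoodM memo0 (recA (↑i) m').2 :=
        fun i hi => IH i hi (by omega)
      have h6 := loop6_main memo0 n hn hn1 hIH (((↑n : Int) + 1 - 6 ^ 0).toNat) 0 pvINF m
        (le_refl _) hm
      have h9 := loop9_main memo0 n hn hn1 hIH (((↑n : Int) + 1 - 9 ^ 0).toNat) 0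
        (loop6 (↑n) m 0 pvINF).1 (loop6 (↑n) m 0 pvINF).2 (le_refl _) h6.2
      have hjn : n - 1 = j := by omega
      rw [hjn] at h6 h9
      have ha6 : relax6 (↑n) (dpN memo0 j) 0 pvINF ≤ pvINF :=
        relax6_le (↑n) (dpN memo0 j) _ 0 pvINF (le_refl _)
      have hres : (loop9 (↑n) (loop6 (↑n) m 0 pvINF).2 0 (loop6 (↑n) m 0 pvINF).1).1
          = Dv memo0 n := by
        rw [h9.1, h6.1, hDv]
        rw [show relax6 (↑n) (dpN memo0 j) 0 pvINF
            = min (relax6 (↑n) (dpN memo0 j) 0 pvINF) pvINF from (min_eq_left ha6).symm,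
          relax9_min (↑n) (dpN memo0 j) (((↑n : Int) + 1 - 9 ^ 0).toNat) 0 _ _ (le_refl _),
          min_eq_left ha6]
      constructor
      · exact hres
      · -- the write memo[n] := Dv n preserves the invariant
        have hg := h9.2
        have hlen : (loop9 (↑n) (loop6 (↑n) m 0 pvINF).2 0 (loop6 (↑n) m 0 pvINF).1).2.length
            = memo0.length := hg.1
        simp only [PySem.List.pySetD_natCast]
        refine ⟨by rw [List.length_set]; exact hlen, fun i hi => ?_⟩
        by_cases hin : i = n
        · subst hin
          refine Or.inr ⟨hm0, hn1, ?_⟩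
          rw [List.getElem?_set_self (by rw [hlen]; exact hn), hres]
        · rw [List.getElem?_set_ne (fun hh => hin hh.symm)]
          exact hg.2 i hi
    · -- pre-filled (or already computed) slot: returned as is
      rw [if_pos hv1]
      refine ⟨?_, hm⟩
      rcases hcase with hsame | ⟨h0, _, hval⟩
      · -- v is memo0's original entry, which is not -1, so Dv n = v
        have hm0v : memo0[n]? = some v := by rw [← hsame, hv]
        rw [Dv_succ, stepVal]
        have : PySem.List.pyGet? memo0 ((↑j : Int) + 1) = some v := by
          rw [show ((↑j : Int) + 1) = ((↑n : Nat) : Int) by push_cast [hndef]; ring,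
            hread0, hm0v]
        rw [this]
        show (v, m).1 = if v ≠ -1 then v
          else min (relax6 ((↑j : Int) + 1) (dpN memo0 j) 0 pvINF)
            (relax9 ((↑j : Int) + 1) (dpN memo0 j) 0 pvINF)
        rw [if_pos hv1]
      · -- v is the already-computed canonical value
        rw [hv] at hval
        exact Option.some.inj hval

lemma foldl_dpN (memo0 : List Int) (n : Nat) :
    (PySem.List.pyRange 1 ((↑n : Int) + 1) 1).foldl (stepB memo0) [0] = dpN memo0 n := by
  induction n with
  | zero => rw [PySem.List.pyRange_one_eq_nil (by norm_num)]; rfl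
  | succ n ih =>
    rw [show ((↑(n + 1) : Int) + 1) = ((↑n : Int) + 1) + 1 by push_cast; ring,
      PySem.List.pyRange_one_succ_right (by omega), List.foldl_append, ih]
    rfl

lemma rec_alt_eq_Dv (memo0 : List Int) (n : Nat) (hn : n < memo0.length) (hn1 : 1 ≤ n) :
    rec_alt (↑n) memo0 = Dv memo0 n := by
  obtain ⟨j, rfl⟩ : ∃ j, n = j + 1 := ⟨n - 1, by omega⟩
  have hread0 : PySem.List.pyGet? memo0 (↑(j + 1)) = some (memo0[j + 1]'hn) := by
    rw [PySem.List.pyGet?_natCast, List.getElem?_eq_getElem]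
  rw [rec_alt]
  rw [if_neg (by omega : ¬ ((↑(j + 1) : Int) = 0)), hread0]
  show (if memo0[j + 1]'hn ≠ -1 then memo0[j + 1]'hn
      else PySem.List.pyGetD
        ((PySem.List.pyRange 1 ((↑(j + 1) : Int) + 1) 1).foldl (stepB memo0) [0])
        (↑(j + 1)) 0) = Dv memo0 (j + 1)
  by_cases hv1 : memo0[j + 1]'hn = -1
  · rw [if_neg (by simp [hv1])]
    simp only [foldl_dpN memo0 (j + 1)]
    rw [pyGetD_dpN memo0 (j + 1) (j + 1) (le_refl _)]
  · rw [if_pos hv1, Dv_succ, stepVal]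
    rw [show ((↑j : Int) + 1) = ((↑(j + 1) : Nat) : Int) by push_cast; ring, hread0]
    show memo0[j + 1]'hn = if memo0[j + 1]'hn ≠ -1 then memo0[j + 1]'hn
      else min (relax6 (↑(j + 1)) (dpN memo0 j) 0 pvINF)
        (relax9 (↑(j + 1)) (dpN memo0 j) 0 pvINF)
    rw [if_pos hv1]

theorem rec_spec : Claim_equal_rec := by
  unfold Claim_equal_rec
  intro x memo _ hpre
  unfold Spec_rec rec
  rcases hpre with h0 | ⟨hx0, hxL⟩ | ⟨hneg, hlb, hne⟩
  · subst h0
    rw [recA, rec_alt]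
    simp
  · -- positive in-range x
    obtain ⟨n, rfl⟩ : ∃ n : Nat, x = ↑n := ⟨x.toNat, (Int.toNat_of_nonneg (by omega)).symm⟩
    have hn : n < memo.length := by exact_mod_cast hxL
    have hn1 : 1 ≤ n := by exact_mod_cast hx0
    rw [(recA_main memo n hn memo (goodM_refl memo)).1, rec_alt_eq_Dv memo n hn hn1]
  · -- negative in-range x with a pre-filled slot: both return memo[x]
    have hir : PySem.Raise.InRange memo.length x := by
      constructor <;> omega
    obtain ⟨v, hv⟩ : ∃ v, PySem.List.pyGet? memo x = some v := by
      cases hg : PySem.List.pyGet? memo x with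
      | none => exact absurd ((PySem.List.pyGet?_eq_none_iff ..).mp hg) (by simp [hir])
      | some v => exact ⟨v, rfl⟩
    have hv1 : v ≠ -1 := fun hh => hne (hh ▸ hv)
    rw [recA, if_neg (by omega : ¬ (x = 0)), hv]
    show (if v ≠ -1 then (v, memo)
        else ((loop9 x (loop6 x memo 0 pvINF).2 0 (loop6 x memo 0 pvINF).1).1,
          PySem.List.pySetD (loop9 x (loop6 x memo 0 pvINF).2 0 (loop6 x memo 0 pvINF).1).2 x
            (loop9 x (loop6 x memo 0 pvINF).2 0 (loop6 x memo 0 pvINF).1).1)).1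
        = rec_alt x memo
    rw [if_pos hv1, rec_alt, if_neg (by omega : ¬ (x = 0)), hv]
    show v = if v ≠ -1 then v
      else PySem.List.pyGetD ((PySem.List.pyRange 1 (x + 1) 1).foldl (stepB memo) [0]) x 0
    rw [if_pos hv1]
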